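-- pv_equiv track=rewrite | github.com/nekopurr/Programmers | Lv1/82612.py | solution
-- ===== SOURCE A (Python) =====
-- def solution(price, money, count):
--     n = 0
--     for i in range(1, count + 1):
--         n += i * price
--     if money < n:
--         return n - money
--     else:
--         return 0
-- ===== SOURCE B (Python) =====
-- def solution(price, money, count):
--     c = count if count > 0 else 0
--     total = price * c * (c + 1) // 2
--     return max(total - money, 0)
-- ===== Notes on version B (the rewrite author's own statement) =====
-- stated objective: faster
-- what changed: Replaces the O(count) accumulation loop over range(1, count+1) with the closed-form triangular-number formula price*c*(c+1)//2 and a max for the clamp.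
import Mathlib
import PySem

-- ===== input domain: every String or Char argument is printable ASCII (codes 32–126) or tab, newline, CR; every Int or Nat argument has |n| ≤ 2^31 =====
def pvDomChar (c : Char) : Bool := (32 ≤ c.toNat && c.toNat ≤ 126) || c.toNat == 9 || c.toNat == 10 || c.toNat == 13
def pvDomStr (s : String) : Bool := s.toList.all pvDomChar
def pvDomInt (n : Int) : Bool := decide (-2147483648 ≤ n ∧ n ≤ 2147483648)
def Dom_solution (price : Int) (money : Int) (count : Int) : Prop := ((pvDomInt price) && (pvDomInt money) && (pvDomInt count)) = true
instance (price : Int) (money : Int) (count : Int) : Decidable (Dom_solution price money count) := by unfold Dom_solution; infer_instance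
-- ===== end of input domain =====

-- B replaces A's O(count) accumulation loop with the closed-form triangular-number formula (asymptotically faster).


-- ===== PORT A =====
-- n = 0; for i in range(1, count+1): n += i*price; then the final branch
def solution (price : Int) (money : Int) (count : Int) : Int :=
  let n := (PySem.List.pyRange 1 (count + 1) 1).foldl (fun n i => n + i * price) 0
  if money < n then n - money else 0

-- ===== PORT B =====
-- c = count if count > 0 else 0; total = price*c*(c+1)//2; max(total - money, 0)
def solution_alt (price : Int) (money : Int) (count : Int) : Int :=
  let c := if count > 0 then count else 0
  let total := PySem.Int.floordiv (price * c * (c + 1)) 2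
  max (total - money) 0

-- ===== PRECONDITION & SPEC =====
def Spec_solution (price : Int) (money : Int) (count : Int) (out : Int) : Prop := out = solution_alt price money count
instance (price : Int) (money : Int) (count : Int) (out : Int) : Decidable (Spec_solution price money count out) := by unfold Spec_solution; infer_instance

-- ===== CLAIM (what is proved, stated in full; the proofs are below) =====
def Claim_equal_solution : Prop := ∀ (price : Int) (money : Int) (count : Int), Dom_solution price money count → Spec_solution price money count (solution price money count)

-- ===== LEMMAS AND PROOFS =====

-- twice A's loop accumulator over 1..n equals price*n*(n+1)
theorem pv_loop_sum (price : Int) (n : Nat) :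
    (((PySem.List.pyRange 1 ((n : Int) + 1) 1).foldl (fun a i => a + i * price) 0)) * 2
      = price * n * (n + 1) := by
  induction n with
  | zero =>
    rw [PySem.List.pyRange_one]
    norm_num
  | succ m ih =>
    have h1 : ((m + 1 : Nat) : Int) + 1 = ((m : Int) + 1) + 1 := by push_cast; ring
    rw [h1, PySem.List.pyRange_one_succ_right (by omega), List.foldl_append,
      List.foldl_cons, List.foldl_nil]
    push_cast
    linear_combination ih

-- ===== VERDICT (by name: the statement is the Claim_ definition above) =====

theorem solution_spec : Claim_equal_solution := by
  intro price money count _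
  unfold Spec_solution solution solution_alt
  by_cases h : count > 0
  · obtain ⟨n, rfl⟩ : ∃ n : Nat, count = (n : Int) :=
      ⟨count.toNat, (Int.toNat_of_nonneg h.le).symm⟩
    have hs := pv_loop_sum price n
    rw [if_pos h]
    set S := (PySem.List.pyRange 1 ((n : Int) + 1) 1).foldl (fun a i => a + i * price) 0 with hS
    have hfd : PySem.Int.floordiv (price * (n : Int) * ((n : Int) + 1)) 2 = S := by
      rw [PySem.Int.floordiv_eq_ediv_of_pos (by norm_num),
        show price * (n : Int) * ((n : Int) + 1) = 2 * S by linarith [hs]]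
      exact Int.mul_ediv_cancel_left S (by norm_num)
    show (if money < S then S - money else 0)
      = max (PySem.Int.floordiv (price * (n : Int) * ((n : Int) + 1)) 2 - money) 0
    rw [hfd]
    split_ifs with hm <;> omega
  · rw [PySem.List.pyRange_one,
      show (count + 1 - 1).toNat = 0 by omega]
    simp only [List.range_zero, List.map_nil, List.foldl_nil, if_neg h]
    rw [show price * 0 * (0 + 1) = 0 by ring,
      PySem.Int.floordiv_eq_ediv_of_pos (by norm_num : (0:Int) < 2)]
    norm_num
    split_ifs with hm <;> omega
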